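-- pv_equiv track=rewrite | github.com/m71681163-del/Pnl.py | Panel.py | il_filter
-- ===== SOURCE A (Python) =====
-- def il_filter(data, il_adi):
--     """Veriyi ile göre filtrele ve kayıtları ayır"""
--     if not data:
--         return None
--
--     lines = data.split('\n')
--     current_record = []
--     records = []
--
--     for line in lines:
--         if line.strip() == "":
--             if current_record:
--                 records.append(current_record)
--                 current_record = []
--         else:
--             current_record.append(line)
--
--     if current_record:
--         records.append(current_record)
--
--     filtered_records = []
--     for record in records:
--         record_text = ' '.join(record)
--         if il_adi.upper() in record_text.upper():
--             filtered_records.append(record)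
--
--     return filtered_records
-- ===== SOURCE B (Python) =====
-- def il_filter(data, il_adi):
--     """Veriyi ile göre filtrele ve kayıtları ayır"""
--     if not data:
--         return None
--
--     needle = il_adi.upper()
--     lines = data.split('\n')
--     filtered_records = []
--     while lines:
--         if lines[0].strip() == "":
--             lines = lines[1:]
--             continue
--         k = 0
--         while k < len(lines) and lines[k].strip() != "":
--             k += 1
--         record = lines[:k]
--         if needle in ' '.join(record).upper():
--             filtered_records.append(record)
--         lines = lines[k:]
--     return filtered_records
-- ===== Notes on version B (the rewrite author's own statement) =====
-- stated objective: alternative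
-- what changed: Replaces A's two-pass design (an accumulator loop building current_record/records, then a separate filter pass) with a single fused two-pointer pass that slices each run of non-blank lines out of the line list and tests it against a pre-uppercased needle immediately.
import Mathlib
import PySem

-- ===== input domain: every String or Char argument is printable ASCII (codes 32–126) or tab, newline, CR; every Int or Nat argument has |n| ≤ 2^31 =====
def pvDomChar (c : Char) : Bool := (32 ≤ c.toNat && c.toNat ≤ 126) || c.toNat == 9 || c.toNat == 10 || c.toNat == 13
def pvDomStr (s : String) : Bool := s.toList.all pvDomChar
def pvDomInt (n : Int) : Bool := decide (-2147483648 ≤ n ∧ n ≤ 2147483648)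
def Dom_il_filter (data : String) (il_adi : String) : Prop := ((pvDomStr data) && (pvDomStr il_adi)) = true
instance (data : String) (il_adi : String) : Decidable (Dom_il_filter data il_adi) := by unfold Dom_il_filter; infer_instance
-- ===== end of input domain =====

-- B replaces A's two passes (record-building accumulator loop, then a filter pass) with one
-- fused two-pointer pass that slices each run of non-blank lines and tests it at once (objective: alternative).

-- ===== PORT A =====
def il_filter (data : String) (il_adi : String) : Option (List (List String)) :=
  if data = "" then none
  else
    let lines := (PySem.Str.split? data "\n").getD []   -- sep "\n" ≠ "", so split? is always some here
    let st := lines.foldl (fun (st : List String × List (List String)) line =>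
        if PySem.Str.strip line = "" then
          if st.1 ≠ [] then ([], st.2 ++ [st.1]) else st
        else (st.1 ++ [line], st.2)) ([], [])
    let records := if st.1 ≠ [] then st.2 ++ [st.1] else st.2
    some (records.foldl (fun acc record =>
      if PySem.Str.isIn (PySem.Str.upper il_adi) (PySem.Str.upper (PySem.Str.join " " record))
      then acc ++ [record] else acc) [])

-- ===== PORT B =====
-- inner `while k < len(lines) and lines[k].strip() != "": k += 1` of Source B
def pvRunLen (lines : List String) (k : Nat) : Nat :=
  if h : k < lines.length ∧ PySem.Str.strip (lines.getD k "") ≠ "" then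
    pvRunLen lines (k + 1)
  else k
termination_by lines.length - k
decreasing_by omega

theorem pvRunLen_ge (lines : List String) (k : Nat) : k ≤ pvRunLen lines k := by
  rw [pvRunLen]
  split
  · exact le_trans (Nat.le_succ k) (pvRunLen_ge lines (k + 1))
  · exact le_refl k
termination_by lines.length - k
decreasing_by omega

theorem pvRunLen_pos (l : String) (ls : List String) (h : PySem.Str.strip l ≠ "") :
    1 ≤ pvRunLen (l :: ls) 0 := by
  rw [pvRunLen]
  rw [dif_pos ⟨by simp, by simpa using h⟩]
  exact pvRunLen_ge _ 1

-- outer `while lines:` loop of Source B (lines is re-bound to a slice each iteration)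
def il_filter_altGo (needle : String) (lines : List String) (acc : List (List String)) :
    List (List String) :=
  match lines with
  | [] => acc
  | l :: ls =>
    if PySem.Str.strip l = "" then
      il_filter_altGo needle (PySem.List.slice (l :: ls) (some 1) none) acc
    else
      let k := pvRunLen (l :: ls) 0
      let record := PySem.List.slice (l :: ls) none (some (k : Int))
      let acc' := if PySem.Str.isIn needle (PySem.Str.upper (PySem.Str.join " " record))
                  then acc ++ [record] else acc
      il_filter_altGo needle (PySem.List.slice (l :: ls) (some (k : Int)) none) acc'
termination_by lines.length
decreasing_by
  · rw [PySem.List.slice_from _ (by norm_num : (0:Int) ≤ 1)]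
    simp
  · rw [PySem.List.slice_from _ (Int.natCast_nonneg k)]
    have h1 : 1 ≤ k := pvRunLen_pos l ls (by assumption)
    simp only [Int.toNat_natCast, List.length_drop, List.length_cons]
    omega

def il_filter_alt (data : String) (il_adi : String) : Option (List (List String)) :=
  if data = "" then none
  else
    let needle := PySem.Str.upper il_adi
    let lines := (PySem.Str.split? data "\n").getD []
    some (il_filter_altGo needle lines [])

-- ===== PRECONDITION & SPEC =====
def Spec_il_filter (data : String) (il_adi : String) (out : Option (List (List String))) : Prop := out = il_filter_alt data il_adi
instance (data : String) (il_adi : String) (out : Option (List (List String))) : Decidable (Spec_il_filter data il_adi out) := by unfold Spec_il_filter; infer_instance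

-- ===== CLAIM (what is proved, stated in full; the proofs are below) =====
def Claim_equal_il_filter : Prop := ∀ (data : String) (il_adi : String), Dom_il_filter data il_adi → Spec_il_filter data il_adi (il_filter data il_adi)

-- ===== LEMMAS AND PROOFS =====

-- proof-side helpers
def pvBlank (l : String) : Bool := PySem.Str.strip l == ""

def pvNB (l : String) : Bool := !pvBlank l

-- the records A builds, starting from a partial record `cur`
def pvRecs (cur : List String) : List String → List (List String)
  | [] => if cur = [] then [] else [cur]
  | l :: ls =>
    if pvBlank l then (if cur = [] then pvRecs [] ls else cur :: pvRecs [] ls)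
    else pvRecs (cur ++ [l]) ls

def pvStep (st : List String × List (List String)) (line : String) :
    List String × List (List String) :=
  if PySem.Str.strip line = "" then
    if st.1 ≠ [] then ([], st.2 ++ [st.1]) else st
  else (st.1 ++ [line], st.2)

theorem pvStep_def : pvStep = (fun (st : List String × List (List String)) line =>
    if PySem.Str.strip line = "" then
      if st.1 ≠ [] then ([], st.2 ++ [st.1]) else st
    else (st.1 ++ [line], st.2)) := rfl

theorem foldA_eq (lines cur : List String) (recs : List (List String)) :
    (if (lines.foldl pvStep (cur, recs)).1 ≠ []
     then (lines.foldl pvStep (cur, recs)).2 ++ [(lines.foldl pvStep (cur, recs)).1]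
     else (lines.foldl pvStep (cur, recs)).2)
    = recs ++ pvRecs cur lines := by
  induction lines generalizing cur recs with
  | nil =>
    by_cases hc : cur = [] <;> simp [pvRecs, hc]
  | cons l ls ih =>
    simp only [List.foldl_cons]
    by_cases hb : PySem.Str.strip l = ""
    · by_cases hc : cur = []
      · have hs : pvStep (cur, recs) l = (cur, recs) := by simp [pvStep, hb, hc]
        rw [hs, ih cur recs, hc]
        simp [pvRecs, pvBlank, hb]
      · have hs : pvStep (cur, recs) l = ([], recs ++ [cur]) := by simp [pvStep, hb, hc]
        rw [hs, ih [] (recs ++ [cur])]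
        simp [pvRecs, pvBlank, hb, hc]
    · have hs : pvStep (cur, recs) l = (cur ++ [l], recs) := by simp [pvStep, hb]
      rw [hs, ih (cur ++ [l]) recs]
      simp [pvRecs, pvBlank, hb]

theorem pvRunLen_eq (lines : List String) (k : Nat) :
    pvRunLen lines k = k + ((lines.drop k).takeWhile pvNB).length := by
  rw [pvRunLen]
  split
  · next h =>
    obtain ⟨hk, hs⟩ := h
    rw [pvRunLen_eq lines (k + 1)]
    have hd : lines.drop k = lines[k] :: lines.drop (k + 1) := by
      rw [List.getElem_cons_drop hk]
    rw [hd, List.takeWhile_cons]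
    have hnb : pvNB lines[k] = true := by
      simp only [pvNB, pvBlank, Bool.not_eq_true', beq_eq_false_iff_ne, ne_eq]
      rw [List.getD_eq_getElem lines "" hk] at hs
      exact hs
    rw [if_pos hnb]
    simp [Nat.add_comm, Nat.add_assoc]
  · next h =>
    by_cases hk : k < lines.length
    · have hs : PySem.Str.strip (lines.getD k "") = "" := by
        by_contra hs; exact h ⟨hk, hs⟩
      have hd : lines.drop k = lines[k] :: lines.drop (k + 1) := by
        rw [List.getElem_cons_drop hk]
      rw [hd, List.takeWhile_cons]
      have hnb : pvNB lines[k] = false := by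
        simp only [pvNB, pvBlank, Bool.not_eq_false', beq_iff_eq]
        rw [List.getD_eq_getElem lines "" hk] at hs
        exact hs
      rw [if_neg (by simp [hnb])]
      simp
    · rw [List.drop_eq_nil_of_le (by omega)]
      simp
termination_by lines.length - k
decreasing_by omega

theorem pvRecs_shift (lines cur : List String) :
    pvRecs cur lines = pvRecs (cur ++ lines.takeWhile pvNB) (lines.dropWhile pvNB) := by
  induction lines generalizing cur with
  | nil => simp
  | cons l ls ih =>
    by_cases hb : pvNB l = true
    · rw [List.takeWhile_cons_of_pos hb, List.dropWhile_cons_of_pos hb]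
      have hbl : pvBlank l = false := by
        simp only [pvNB, Bool.not_eq_true'] at hb; exact hb
      rw [show pvRecs cur (l :: ls) = pvRecs (cur ++ [l]) ls by simp [pvRecs, hbl]]
      rw [ih (cur ++ [l])]
      simp
    · have hb' : pvNB l = false := by simpa using hb
      rw [List.takeWhile_cons_of_neg (by simp [hb']), List.dropWhile_cons_of_neg (by simp [hb'])]
      simp

theorem pvRecs_cons_of_nonblank (l : String) (ls : List String) (h : pvNB l = true) :
    pvRecs [] (l :: ls) =
      (l :: ls).takeWhile pvNB :: pvRecs [] ((l :: ls).dropWhile pvNB) := by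
  rw [pvRecs_shift (l :: ls) []]
  rw [List.nil_append]
  rw [List.takeWhile_cons_of_pos h, List.dropWhile_cons_of_pos h]
  cases hd : ls.dropWhile pvNB with
  | nil => simp [pvRecs]
  | cons b bs =>
    have hb : pvNB b = false := by
      have h := List.head_dropWhile_not pvNB (l := ls) (by simp [hd])
      simp only [hd, List.head_cons] at h
      exact h
    have hbb : pvBlank b = true := by
      simpa [pvNB] using hb
    simp [pvRecs, hbb]

theorem altGo_eq (needle : String) (lines : List String) (acc : List (List String)) :
    il_filter_altGo needle lines acc =
      acc ++ (pvRecs [] lines).filter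
        (fun r => PySem.Str.isIn needle (PySem.Str.upper (PySem.Str.join " " r))) := by
  cases lines with
  | nil => simp [il_filter_altGo, pvRecs]
  | cons l ls =>
    rw [il_filter_altGo]
    by_cases hb : PySem.Str.strip l = ""
    · rw [if_pos hb]
      rw [PySem.List.slice_from _ (by norm_num : (0:Int) ≤ 1)]
      simp only [Int.toNat_one, List.drop_succ_cons, List.drop_zero]
      rw [altGo_eq needle ls acc]
      have : pvBlank l = true := by simp [pvBlank, hb]
      simp [pvRecs, this]
    · have hnb : pvNB l = true := by simp [pvNB, pvBlank, hb]
      have hk : pvRunLen (l :: ls) 0 = ((l :: ls).takeWhile pvNB).length := by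
        rw [pvRunLen_eq (l :: ls) 0]; simp
      have hrec : PySem.List.slice (l :: ls) none (some ((pvRunLen (l :: ls) 0 : Nat) : Int))
          = (l :: ls).takeWhile pvNB := by
        rw [PySem.List.slice_to _ (Int.natCast_nonneg _)]
        rw [Int.toNat_natCast, hk]
        exact (List.prefix_iff_eq_take.mp (List.takeWhile_prefix pvNB)).symm
      have hrest : PySem.List.slice (l :: ls) (some ((pvRunLen (l :: ls) 0 : Nat) : Int)) none
          = (l :: ls).dropWhile pvNB := by
        rw [PySem.List.slice_from _ (Int.natCast_nonneg _)]
        rw [Int.toNat_natCast, hk]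
        have hgen : ∀ (xs t d : List String), t ++ d = xs → xs.drop t.length = d := by
          rintro xs t d rfl; exact List.drop_left
        exact hgen _ _ _ (List.takeWhile_append_dropWhile)
      rw [if_neg hb]
      simp only [hrec, hrest]
      rw [altGo_eq needle ((l :: ls).dropWhile pvNB)]
      rw [pvRecs_cons_of_nonblank l ls hnb]
      rw [List.filter_cons]
      by_cases hp : PySem.Str.isIn needle
          (PySem.Str.upper (PySem.Str.join " " ((l :: ls).takeWhile pvNB))) = true
      · rw [if_pos hp, if_pos hp]
        simp
      · rw [if_neg hp, if_neg hp]
termination_by lines.length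
decreasing_by
  · simp
  · have h1 : ((l :: ls).dropWhile pvNB).length ≤ ls.length := by
      rw [List.dropWhile_cons_of_pos hnb]
      exact List.length_dropWhile_le pvNB ls
    simp only [List.length_cons]
    omega

-- ===== VERDICT (by name: the statement is the Claim_ definition above) =====
theorem il_filter_spec : Claim_equal_il_filter := by
  intro data il_adi _hd
  unfold Spec_il_filter il_filter il_filter_alt
  by_cases h : data = ""
  · simp [h]
  · rw [if_neg h, if_neg h]
    simp only []
    rw [← pvStep_def]
    rw [foldA_eq _ [] []]
    rw [altGo_eq]
    rw [PySem.List.foldl_append_if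
      (fun record => PySem.Str.isIn (PySem.Str.upper il_adi) (PySem.Str.upper (PySem.Str.join " " record)))
      (fun r => r)]
    simp [List.map_id']
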